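-- pv_equiv track=rewrite | github.com/erezrozenbaum/pf9-mngt | tests/test_v18510_fixes.py | _resolve_content_type
-- ===== SOURCE A (Python) =====
-- _ALLOWED_TYPES = {
--     "image/png": ".png",
--     "image/jpeg": ".jpg",
--     "image/gif": ".gif",
--     "image/webp": ".webp",
--     "image/svg+xml": ".svg",
-- }
--
-- _EXT_TO_CT = {
--     ".png": "image/png",
--     ".jpg": "image/jpeg",
--     ".jpeg": "image/jpeg",
--     ".gif": "image/gif",
--     ".webp": "image/webp",
--     ".svg": "image/svg+xml",
-- }
--
-- def _resolve_content_type(content_type: str | None, filename: str) -> str | None: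
--     """
--     Mirrors the v1.85.10 content-type resolution logic in upload_branding_logo.
--     Returns the resolved MIME type if valid, or None if unknown.
--     """
--     ct = (content_type or "").split(";")[0].strip().lower()
--     if ct in _ALLOWED_TYPES:
--         return ct
--     # Fallback to filename extension
--     orig = (filename or "").lower()
--     for suffix, guessed_ct in _EXT_TO_CT.items():
--         if orig.endswith(suffix):
--             return guessed_ct
--     return None  # unknown type — caller should raise 400
-- ===== SOURCE B (Python) =====
-- _ALLOWED_TYPES = {
--     "image/png": ".png",
--     "image/jpeg": ".jpg",
--     "image/gif": ".gif",
--     "image/webp": ".webp",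
--     "image/svg+xml": ".svg",
-- }
--
-- _EXT_TO_CT = {
--     ".png": "image/png",
--     ".jpg": "image/jpeg",
--     ".jpeg": "image/jpeg",
--     ".gif": "image/gif",
--     ".webp": "image/webp",
--     ".svg": "image/svg+xml",
-- }
--
--
-- def _resolve_content_type(content_type, filename):
--     ct = (content_type or "").split(";")[0].strip().lower()
--     if ct in _ALLOWED_TYPES:
--         return ct
--     orig = (filename or "").lower()
--     if "." in orig:
--         return _EXT_TO_CT.get("." + orig.rsplit(".", 1)[-1])
--     return None
-- ===== Notes on version B (the rewrite author's own statement) =====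
-- stated objective: idiomatic
-- what changed: The fallback's linear endswith-scan over _EXT_TO_CT is replaced by extracting the extension after the last '.' (rsplit) and doing one keyed dict lookup.
import Mathlib
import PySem

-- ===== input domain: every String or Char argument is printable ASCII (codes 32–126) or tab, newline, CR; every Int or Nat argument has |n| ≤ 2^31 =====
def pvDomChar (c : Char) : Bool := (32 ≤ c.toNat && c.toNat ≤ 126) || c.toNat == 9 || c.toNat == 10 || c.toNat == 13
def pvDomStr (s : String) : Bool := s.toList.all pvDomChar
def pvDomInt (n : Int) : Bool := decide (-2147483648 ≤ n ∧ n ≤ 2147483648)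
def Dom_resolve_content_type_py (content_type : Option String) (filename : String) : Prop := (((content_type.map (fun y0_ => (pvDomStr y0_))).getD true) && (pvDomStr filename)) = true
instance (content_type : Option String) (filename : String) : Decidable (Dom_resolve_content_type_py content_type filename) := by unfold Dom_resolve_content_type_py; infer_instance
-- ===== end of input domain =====

-- B replaces A's linear endswith-scan over _EXT_TO_CT by a single keyed lookup on the
-- extension after the last '.' (objective: idiomatic; same observable behaviour).

-- ===== PORT A =====
def pvAllowedTypes : PySem.Dict String String :=
  PySem.Dict.ofList
    [("image/png", ".png"), ("image/jpeg", ".jpg"), ("image/gif", ".gif"),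
     ("image/webp", ".webp"), ("image/svg+xml", ".svg")]

def pvExtToCt : PySem.Dict String String :=
  PySem.Dict.ofList
    [(".png", "image/png"), (".jpg", "image/jpeg"), (".jpeg", "image/jpeg"),
     (".gif", "image/gif"), (".webp", "image/webp"), (".svg", "image/svg+xml")]

-- 'for suffix, guessed_ct in _EXT_TO_CT.items(): if orig.endswith(suffix): return guessed_ct'
def pvScanExt (orig : String) : List (String × String) → Option String
  | [] => none
  | (sfx, guessed) :: rest =>
    if PySem.Str.endswith orig sfx then some guessed else pvScanExt orig rest

def resolve_content_type_py (content_type : Option String) (filename : String) : Option String :=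
  -- ct = (content_type or "").split(";")[0].strip().lower()   ([0] always in range: split is never empty)
  let ct := PySem.Str.lower (PySem.Str.strip
    (PySem.List.pyGetD ((PySem.Str.split? (content_type.getD "") ";").getD []) 0 ""))
  if pvAllowedTypes.contains ct then some ct
  else
    -- orig = (filename or "").lower()   ((filename or "") = filename for a str argument)
    let orig := PySem.Str.lower filename
    pvScanExt orig pvExtToCt.items

-- ===== PORT B =====
-- hand port of orig.rsplit(".", 1)[-1] (exact): the characters after the LAST '.'
def pvAfterLastDot (cs : List Char) : List Char :=
  (cs.reverse.takeWhile (fun c => c ≠ '.')).reverse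

def resolve_content_type_py_alt (content_type : Option String) (filename : String) : Option String :=
  let ct := PySem.Str.lower (PySem.Str.strip
    (PySem.List.pyGetD ((PySem.Str.split? (content_type.getD "") ";").getD []) 0 ""))
  if pvAllowedTypes.contains ct then some ct
  else
    let orig := PySem.Str.lower filename
    if PySem.Str.isIn "." orig then
      -- _EXT_TO_CT.get("." + orig.rsplit(".", 1)[-1])
      pvExtToCt.get? (String.ofList ('.' :: pvAfterLastDot orig.toList))
    else none

-- ===== PRECONDITION & SPEC =====
def Spec_resolve_content_type_py (content_type : Option String) (filename : String) (out : Option String) : Prop := out = resolve_content_type_py_alt content_type filename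
instance (content_type : Option String) (filename : String) (out : Option String) : Decidable (Spec_resolve_content_type_py content_type filename out) := by unfold Spec_resolve_content_type_py; infer_instance

-- ===== CLAIM (what is proved, stated in full; the proofs are below) =====
def Claim_equal_resolve_content_type_py : Prop := ∀ (content_type : Option String) (filename : String), Dom_resolve_content_type_py content_type filename → Spec_resolve_content_type_py content_type filename (resolve_content_type_py content_type filename)

-- ===== LEMMAS AND PROOFS =====

-- takeWhile (≠ '.') over t ++ '.' :: u, with t dot-free, is t
lemma pv_takeWhile_dot (t u : List Char) (ht : ∀ c ∈ t, (c ≠ '.')) :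
    (t ++ '.' :: u).takeWhile (fun c => c ≠ '.') = t := by
  rw [List.takeWhile_append]
  have h1 : t.takeWhile (fun c => (c ≠ '.' : Bool)) = t :=
    List.takeWhile_eq_self_iff.2 (by intro c hc; simpa using ht c hc)
  rw [h1]
  simp

-- a dot-free suffix key '.'::k matches iff the string has a dot and k is the part after the last dot
lemma pv_dot_suffix_iff (cs k : List Char) (hk : '.' ∉ k) :
    ('.' :: k) <:+ cs ↔ ('.' ∈ cs ∧ cs.reverse.takeWhile (fun c => c ≠ '.') = k.reverse) := by
  rw [← List.reverse_prefix, List.reverse_cons]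
  constructor
  · rintro ⟨u, hu⟩
    rw [List.append_assoc] at hu
    constructor
    · rw [← List.mem_reverse, ← hu]; simp
    · rw [← hu, List.cons_append]
      exact pv_takeWhile_dot _ _ (by intro c hc; simp at hc; rintro rfl; exact hk (by simpa using hc))
  · rintro ⟨hin, htw⟩
    have hin' : '.' ∈ cs.reverse := by simpa using hin
    have hne : cs.reverse.dropWhile (fun c => c ≠ '.') ≠ [] := by
      simp only [ne_eq, List.dropWhile_eq_nil_iff]
      push Not
      exact ⟨'.', hin', by simp⟩
    have hhead := List.head_dropWhile_not (fun c => (c ≠ '.' : Bool)) hne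
    have hd : (cs.reverse.dropWhile (fun c => c ≠ '.')).head hne = '.' := by
      simpa using hhead
    refine ⟨(cs.reverse.dropWhile (fun c => c ≠ '.')).tail, ?_⟩
    conv_rhs => rw [← List.takeWhile_append_dropWhile (p := fun c => (c ≠ '.' : Bool)) (l := cs.reverse)]
    rw [htw, ← List.cons_head_tail hne, hd]
    simp

lemma pv_endswith_eq (cs k : List Char) (hk : '.' ∉ k) :
    PySem.Chars.endswith cs ('.' :: k) =
    (decide ('.' ∈ cs) && (cs.reverse.takeWhile (fun c => c ≠ '.') == k.reverse)) := by
  rw [Bool.eq_iff_iff]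
  simp only [PySem.Chars.endswith_iff, Bool.and_eq_true, decide_eq_true_eq, beq_iff_eq]
  exact pv_dot_suffix_iff cs k hk

lemma pv_beq_ofList (m l : List Char) : (String.ofList m == String.ofList l) = (m == l) := by
  rw [Bool.eq_iff_iff]
  simp [String.ofList_inj]

lemma pv_ew (orig s : String) (k : List Char) (hs : s.toList = '.' :: k) (hk : '.' ∉ k) :
    PySem.Str.endswith orig s =
    (decide ('.' ∈ orig.toList) && (orig.toList.reverse.takeWhile (fun c => c ≠ '.') == k.reverse)) := by
  rw [PySem.Str.endswith_eq, hs]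
  exact pv_endswith_eq _ _ hk

lemma pv_keyeq (s : String) (k : List Char) (hs : s = String.ofList ('.' :: k)) (x : List Char) :
    (s == String.ofList ('.' :: x.reverse)) = (x == k.reverse) := by
  subst hs
  rw [pv_beq_ofList, Bool.eq_iff_iff]
  simp only [beq_iff_eq, List.cons.injEq, true_and]
  constructor <;> (rintro rfl; simp)

-- A's scan over _EXT_TO_CT equals B's keyed lookup on the last-dot extension
lemma pv_scan_eq (orig : String) :
    pvScanExt orig pvExtToCt.items =
    (if PySem.Str.isIn "." orig then
        pvExtToCt.get? (String.ofList ('.' :: pvAfterLastDot orig.toList))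
     else none) := by
  have hitems : pvExtToCt.items = [(".png", "image/png"), (".jpg", "image/jpeg"), (".jpeg", "image/jpeg"),
     (".gif", "image/gif"), (".webp", "image/webp"), (".svg", "image/svg+xml")] := by decide
  have hmk : pvExtToCt = PySem.Dict.mk [(".png", "image/png"), (".jpg", "image/jpeg"), (".jpeg", "image/jpeg"),
     (".gif", "image/gif"), (".webp", "image/webp"), (".svg", "image/svg+xml")] := by decide
  have hisin : PySem.Str.isIn "." orig = decide ('.' ∈ orig.toList) := by
    rw [PySem.Str.isIn_eq, Bool.eq_iff_iff]
    simp only [decide_eq_true_eq]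
    have : ("." : String).toList = ['.'] := by decide
    rw [this, PySem.Chars.isIn_iff_infix]
    exact List.singleton_infix_iff '.' orig.toList
  rw [hitems]
  simp only [pvScanExt]
  rw [pv_ew orig ".png" ['p','n','g'] (by decide) (by decide),
      pv_ew orig ".jpg" ['j','p','g'] (by decide) (by decide),
      pv_ew orig ".jpeg" ['j','p','e','g'] (by decide) (by decide),
      pv_ew orig ".gif" ['g','i','f'] (by decide) (by decide),
      pv_ew orig ".webp" ['w','e','b','p'] (by decide) (by decide),
      pv_ew orig ".svg" ['s','v','g'] (by decide) (by decide),
      hisin]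
  by_cases h : '.' ∈ orig.toList
  · simp only [h, decide_true, Bool.true_and, if_true]
    rw [hmk]
    simp only [pvAfterLastDot, PySem.Dict.get?_mk_cons,
      pv_keyeq ".png" ['p','n','g'] (by decide),
      pv_keyeq ".jpg" ['j','p','g'] (by decide),
      pv_keyeq ".jpeg" ['j','p','e','g'] (by decide),
      pv_keyeq ".gif" ['g','i','f'] (by decide),
      pv_keyeq ".webp" ['w','e','b','p'] (by decide),
      pv_keyeq ".svg" ['s','v','g'] (by decide)]
    rw [(PySem.Dict.get?_eq_none_iff_contains (PySem.Dict.mk []) _).mpr rfl]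
  · simp [h]

-- ===== VERDICT (by name: the statement is the Claim_ definition above) =====
theorem resolve_content_type_py_spec : Claim_equal_resolve_content_type_py := by
  intro content_type filename _
  unfold Spec_resolve_content_type_py
  show resolve_content_type_py content_type filename = resolve_content_type_py_alt content_type filename
  simp only [resolve_content_type_py, resolve_content_type_py_alt]
  congr 1
  exact pv_scan_eq _
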